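-- pv_equiv track=rewrite | github.com/hankcs/HanLP | hanlp/transform/txt.py | words_to_bmes
-- ===== SOURCE A (Python) =====
-- def words_to_bmes(words):
--     tags = []
--     for w in words:
--         if not w:
--             raise ValueError('{} contains None or zero-length word {}'.format(str(words), w))
--         if len(w) == 1:
--             tags.append('S')
--         else:
--             tags.extend(['B'] + ['M'] * (len(w) - 2) + ['E'])
--     return tags
-- ===== SOURCE B (Python) =====
-- def words_to_bmes(words):
--     starts = set()
--     ends = set()
--     total = 0
--     for w in words:
--         if not w:
--             raise ValueError('{} contains None or zero-length word {}'.format(str(words), w))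
--         starts.add(total)
--         total += len(w)
--         ends.add(total - 1)
--     return ['S' if p in starts and p in ends else
--             'B' if p in starts else
--             'E' if p in ends else
--             'M'
--             for p in range(total)]
-- ===== Notes on version B (the rewrite author's own statement) =====
-- stated objective: alternative
-- what changed: Replaces A's per-word tag-template emission with a boundary-set algorithm: one pass records the global start and end character positions of every word via cumulative lengths, then each global position 0..total-1 is classified S/B/E/M by membership in those two sets; Pre_ excludes lists containing an empty string, on which A raises ValueError and B raises the same error.
import Mathlib
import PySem

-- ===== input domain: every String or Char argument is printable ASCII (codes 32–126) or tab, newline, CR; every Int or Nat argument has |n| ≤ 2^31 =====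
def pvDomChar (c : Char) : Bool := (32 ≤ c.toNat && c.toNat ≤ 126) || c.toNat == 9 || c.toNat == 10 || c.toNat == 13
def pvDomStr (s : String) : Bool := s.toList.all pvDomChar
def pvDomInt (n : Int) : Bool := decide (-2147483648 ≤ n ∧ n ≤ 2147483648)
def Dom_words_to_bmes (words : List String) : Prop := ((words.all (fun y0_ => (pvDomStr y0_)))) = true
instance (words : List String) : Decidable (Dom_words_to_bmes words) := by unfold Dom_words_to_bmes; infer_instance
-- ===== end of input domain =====

-- B replaces A's per-word tag-template emission with a boundary-set algorithm: one pass records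
-- the global start/end character positions via cumulative lengths, then classifies every global
-- position by membership in those sets; alternative decomposition, same cost.
-- ===== PORT A =====
def words_to_bmes (words : List String) : List String :=
  words.foldl (fun tags w =>
    if w.toList.length == 1 then tags ++ ["S"]
    else tags ++ (["B"] ++ List.replicate (w.toList.length - 2) "M" ++ ["E"])) []

-- ===== PORT B =====
def words_to_bmes_alt (words : List String) : List String :=
  let st := words.foldl
    (fun (st : PySem.Set Int × PySem.Set Int × Int) w =>
      let starts := PySem.Set.add st.1 st.2.2
      let total := st.2.2 + (w.toList.length : Int)
      let ends := PySem.Set.add st.2.1 (total - 1)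
      (starts, ends, total))
    (PySem.Set.empty, PySem.Set.empty, 0)
  (PySem.List.pyRange 0 st.2.2 1).map (fun p =>
    if PySem.Set.contains st.1 p && PySem.Set.contains st.2.1 p then "S"
    else if PySem.Set.contains st.1 p then "B"
    else if PySem.Set.contains st.2.1 p then "E"
    else "M")

-- ===== PRECONDITION & SPEC =====
-- Pre_ excludes lists containing an empty string, on which A raises ValueError (B raises the same error).
def Pre_words_to_bmes (words : List String) : Prop := ∀ w ∈ words, w ≠ ""
instance (words : List String) : Decidable (Pre_words_to_bmes words) := by unfold Pre_words_to_bmes; infer_instance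
def pvWitness_words_to_bmes : List String := (["a", "to", "the"])
def Spec_words_to_bmes (words : List String) (out : List String) : Prop := out = words_to_bmes_alt words
instance (words : List String) (out : List String) : Decidable (Spec_words_to_bmes words out) := by unfold Spec_words_to_bmes; infer_instance

-- ===== CLAIM (what is proved, stated in full; the proofs are below) =====
def Claim_equal_words_to_bmes : Prop := ∀ (words : List String), Dom_words_to_bmes words → Pre_words_to_bmes words → Spec_words_to_bmes words (words_to_bmes words)

-- ===== LEMMAS AND PROOFS =====

-- the per-word tag template A emits
def bmesTmpl (w : String) : List String :=
  if w.toList.length == 1 then ["S"]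
  else ["B"] ++ List.replicate (w.toList.length - 2) "M" ++ ["E"]

-- global start positions of the words, starting at offset off
def startsOf (off : Int) : List String → List Int
  | [] => []
  | w :: ws => off :: startsOf (off + w.toList.length) ws

-- global end positions (position of each word's last character)
def endsOf (off : Int) : List String → List Int
  | [] => []
  | w :: ws => (off + w.toList.length - 1) :: endsOf (off + w.toList.length) ws

def sumLen (words : List String) : Int := (words.map (fun w => (w.toList.length : Int))).sum

theorem sumLen_nonneg (ws : List String) : 0 ≤ sumLen ws := by
  induction ws with
  | nil => simp [sumLen]
  | cons w t ih => simp only [sumLen, List.map_cons, List.sum_cons]; have := ih; unfold sumLen at this; positivity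

theorem mem_startsOf_ge (off : Int) (ws : List String) (q : Int) (h : q ∈ startsOf off ws) : off ≤ q := by
  induction ws generalizing off with
  | nil => simp [startsOf] at h
  | cons w t ih =>
    simp only [startsOf, List.mem_cons] at h
    rcases h with rfl | h
    · exact le_refl _
    · have := ih _ h; omega

theorem mem_endsOf_ge (off : Int) (ws : List String) (q : Int)
    (hne : ∀ w ∈ ws, w.toList.length ≠ 0) (h : q ∈ endsOf off ws) : off ≤ q := by
  induction ws generalizing off with
  | nil => simp [endsOf] at h
  | cons w t ih =>
    simp only [endsOf, List.mem_cons] at h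
    have hw : w.toList.length ≠ 0 := hne w (by simp)
    rcases h with rfl | h
    · omega
    · have := ih _ (fun x hx => hne x (by simp [hx])) h; omega

-- the set-building fold: running total and membership of the two sets
theorem fold_sets (ws : List String) (S E : PySem.Set Int) (t : Int) :
    (ws.foldl
      (fun (st : PySem.Set Int × PySem.Set Int × Int) w =>
        let starts := PySem.Set.add st.1 st.2.2
        let total := st.2.2 + (w.toList.length : Int)
        let ends := PySem.Set.add st.2.1 (total - 1)
        (starts, ends, total))
      (S, E, t)).2.2 = t + sumLen ws ∧
    (∀ p : Int, p ∈ (ws.foldl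
      (fun (st : PySem.Set Int × PySem.Set Int × Int) w =>
        let starts := PySem.Set.add st.1 st.2.2
        let total := st.2.2 + (w.toList.length : Int)
        let ends := PySem.Set.add st.2.1 (total - 1)
        (starts, ends, total))
      (S, E, t)).1 ↔ p ∈ S ∨ p ∈ startsOf t ws) ∧
    (∀ p : Int, p ∈ (ws.foldl
      (fun (st : PySem.Set Int × PySem.Set Int × Int) w =>
        let starts := PySem.Set.add st.1 st.2.2
        let total := st.2.2 + (w.toList.length : Int)
        let ends := PySem.Set.add st.2.1 (total - 1)
        (starts, ends, total))
      (S, E, t)).2.1 ↔ p ∈ E ∨ p ∈ endsOf t ws) := by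
  induction ws generalizing S E t with
  | nil => simp [startsOf, endsOf, sumLen]
  | cons w t' ih =>
    simp only [List.foldl_cons]
    obtain ⟨h1, h2, h3⟩ := ih (PySem.Set.add S t) (PySem.Set.add E (t + (w.toList.length : Int) - 1)) (t + (w.toList.length : Int))
    refine ⟨?_, ?_, ?_⟩
    · rw [h1]; simp [sumLen]; ring
    · intro p
      rw [h2 p, PySem.Set.mem_add]
      simp only [startsOf, List.mem_cons]
      tauto
    · intro p
      rw [h3 p, PySem.Set.mem_add]
      simp only [endsOf, List.mem_cons]
      tauto

-- a positional map over range n whose values are B at 0, E at n-1, M between is A's long-word template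
theorem tagList_eq (n : Nat) (hn2 : 2 ≤ n) (f : Nat → String)
    (hf0 : f 0 = "B") (hfl : f (n - 1) = "E")
    (hmid : ∀ i, 0 < i → i < n - 1 → f i = "M") :
    (List.range n).map f = "B" :: List.replicate (n - 2) "M" ++ ["E"] := by
  obtain ⟨m, rfl⟩ : ∃ m, n = m + 2 := ⟨n - 2, by omega⟩
  apply List.ext_getElem
  · simp
  · intro i h1 h2
    simp only [List.length_map, List.length_range] at h1
    simp only [List.getElem_map, List.getElem_range]
    rcases Nat.lt_or_ge i 1 with hi | hi
    · interval_cases i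
      simpa using hf0
    · obtain ⟨j, rfl⟩ : ∃ j, i = j + 1 := ⟨i - 1, by omega⟩
      have hj2 : j < (List.replicate (m + 2 - 2) "M" ++ ["E"]).length := by simp at h2 ⊢; omega
      have hstep : ("B" :: List.replicate (m + 2 - 2) "M" ++ ["E"])[j + 1]'h2
          = (List.replicate (m + 2 - 2) "M" ++ ["E"])[j]'hj2 := List.getElem_cons_succ ..
      rw [hstep]
      rcases Nat.lt_or_ge j m with hj | hj
      · rw [List.getElem_append_left (by simpa using hj), List.getElem_replicate]
        exact hmid _ (by omega) (by omega)
      · have hje : j = m := by omega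
        rw [List.getElem_append_right (by simp; omega)]
        simpa [hje] using hfl

-- classifying one word's span of positions gives that word's template
theorem chunk_eq (off : Int) (n : Nat) (hn : n ≠ 0) (S E : PySem.Set Int)
    (hS : ∀ p : Int, off ≤ p → p < off + n → (PySem.Set.contains S p = true ↔ p = off))
    (hE : ∀ p : Int, off ≤ p → p < off + n → (PySem.Set.contains E p = true ↔ p = off + n - 1)) :
    (PySem.List.pyRange off (off + n) 1).map (fun p =>
      if PySem.Set.contains S p && PySem.Set.contains E p then "S"
      else if PySem.Set.contains S p then "B"
      else if PySem.Set.contains E p then "E"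
      else "M") =
    (if n == 1 then ["S"] else ["B"] ++ List.replicate (n - 2) "M" ++ ["E"]) := by
  rw [PySem.List.pyRange_one]
  have hcnt : (off + (n : Int) - off).toNat = n := by omega
  rw [hcnt, List.map_map]
  have hmem : ∀ i : Nat, i < n →
      ((off + (i : Int) ∈ S) ↔ (i : Int) = 0) ∧
      ((off + (i : Int) ∈ E) ↔ (i : Int) = (n : Int) - 1) := by
    intro i hi
    refine ⟨(PySem.Set.contains_iff S _).symm.trans ?_, (PySem.Set.contains_iff E _).symm.trans ?_⟩
    · rw [hS _ (by omega) (by omega)]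
      constructor <;> intro <;> omega
    · rw [hE _ (by omega) (by omega)]
      constructor <;> intro <;> omega
  by_cases hone : n = 1
  · subst hone
    simp only [List.range_one, List.map_cons, List.map_nil, Function.comp]
    have h := hmem 0 (by omega)
    rw [show off + ((0 : Nat) : Int) = off from by norm_num] at h
    have hms : off ∈ S := h.1.mpr (by norm_num)
    have hme : off ∈ E := h.2.mpr (by norm_num)
    simp [hms, hme]
  · have hn2 : 2 ≤ n := by omega
    have hne1 : ¬ (n == 1) = true := by simp [hone]
    simp only [hne1]
    rw [tagList_eq n hn2 _ ?_ ?_ ?_]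
    · simp
    · have h := hmem 0 (by omega)
      rw [show off + ((0 : Nat) : Int) = off from by norm_num] at h
      have hms : off ∈ S := h.1.mpr (by norm_num)
      have hme : off ∉ E := fun hm => by have := h.2.mp hm; omega
      simp [Function.comp, hms, hme]
    · have h := hmem (n - 1) (by omega)
      have hms : off + ((n - 1 : Nat) : Int) ∉ S := fun hm => by have := h.1.mp hm; omega
      have hme : off + ((n - 1 : Nat) : Int) ∈ E := h.2.mpr (by omega)
      simp [Function.comp, hms, hme]
    · intro i hi0 hil
      have h := hmem i (by omega)
      have hms : off + ((i : Nat) : Int) ∉ S := fun hm => by have := h.1.mp hm; omega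
      have hme : off + ((i : Nat) : Int) ∉ E := fun hm => by have := h.2.mp hm; omega
      simp [Function.comp, hms, hme]

-- classifying all global positions by the boundary sets yields the concatenation of the templates
theorem classify_concat (ws : List String) (off : Int) (S E : PySem.Set Int)
    (hne : ∀ w ∈ ws, w.toList.length ≠ 0)
    (hS : ∀ p : Int, off ≤ p → (PySem.Set.contains S p = true ↔ p ∈ startsOf off ws))
    (hE : ∀ p : Int, off ≤ p → (PySem.Set.contains E p = true ↔ p ∈ endsOf off ws)) :
    (PySem.List.pyRange off (off + sumLen ws) 1).map (fun p =>
      if PySem.Set.contains S p && PySem.Set.contains E p then "S"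
      else if PySem.Set.contains S p then "B"
      else if PySem.Set.contains E p then "E"
      else "M") = ws.flatMap bmesTmpl := by
  induction ws generalizing off with
  | nil =>
    rw [show off + sumLen [] = off by simp [sumLen], PySem.List.pyRange_one_eq_nil (le_refl off)]
    simp
  | cons w t ih =>
    have hn : w.toList.length ≠ 0 := hne w (by simp)
    have hrest : 0 ≤ sumLen t := sumLen_nonneg t
    have hsum : off + sumLen (w :: t) = (off + w.toList.length) + sumLen t := by
      simp [sumLen]; ring
    rw [hsum, PySem.List.pyRange_one_append off (off + w.toList.length) _ (by omega) (by omega),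
        List.map_append]
    have hchunk := chunk_eq off w.toList.length hn S E
      (fun p hp1 hp2 => by
        rw [hS p hp1]
        simp only [startsOf, List.mem_cons]
        constructor
        · rintro (rfl | hm)
          · rfl
          · have := mem_startsOf_ge _ _ _ hm; omega
        · intro h; exact Or.inl h)
      (fun p hp1 hp2 => by
        rw [hE p hp1]
        simp only [endsOf, List.mem_cons]
        constructor
        · rintro (rfl | hm)
          · rfl
          · have := mem_endsOf_ge _ t p (fun x hx => hne x (by simp [hx])) hm; omega
        · intro h; exact Or.inl h)
    rw [hchunk, ih (off + w.toList.length)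
      (fun x hx => hne x (by simp [hx]))
      (fun p hp => by
        rw [hS p (by omega)]
        simp only [startsOf, List.mem_cons]
        constructor
        · rintro (rfl | hm)
          · omega
          · exact hm
        · intro h; exact Or.inr h)
      (fun p hp => by
        rw [hE p (by omega)]
        simp only [endsOf, List.mem_cons]
        constructor
        · rintro (rfl | hm)
          · omega
          · exact hm
        · intro h; exact Or.inr h)]
    simp [bmesTmpl]

-- A's fold is the concatenation of the per-word templates
theorem A_eq_flatMap (ws : List String) : words_to_bmes ws = ws.flatMap bmesTmpl := by
  unfold words_to_bmes
  have h1 := PySem.List.foldl_congr_mem' (l := ws) (init := ([] : List String))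
    (f := fun tags w =>
      if w.toList.length == 1 then tags ++ ["S"]
      else tags ++ (["B"] ++ List.replicate (w.toList.length - 2) "M" ++ ["E"]))
    (g := fun tags w => tags ++ bmesTmpl w)
    (by intro x _ acc; unfold bmesTmpl; dsimp only; split <;> rfl)
  rw [h1, PySem.List.foldl_append_eq_flatMap, List.nil_append]

-- ===== VERDICT (by name: the statement is the Claim_ definition above) =====
theorem words_to_bmes_spec : Claim_equal_words_to_bmes := by
  intro words _ hpre
  unfold Spec_words_to_bmes words_to_bmes_alt
  have hne : ∀ w ∈ words, w.toList.length ≠ 0 := by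
    intro w hw h
    exact hpre w hw (String.toList_inj.mp (by simpa using List.eq_nil_of_length_eq_zero h))
  obtain ⟨ht, hs, he⟩ := fold_sets words PySem.Set.empty PySem.Set.empty 0
  simp only []
  rw [A_eq_flatMap]
  rw [ht]
  rw [show (0 : Int) + sumLen words = 0 + sumLen words from rfl]
  exact (classify_concat words 0 _ _ hne
    (fun p _ => by rw [PySem.Set.contains_iff, hs p]; simp [PySem.Set.empty])
    (fun p _ => by rw [PySem.Set.contains_iff, he p]; simp [PySem.Set.empty])).symm
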